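-- pv_equiv track=rewrite | github.com/Meng-Gen/rosalind | TextbookTrack/1E/1e.py | get_skew_prefix
-- ===== SOURCE A (Python) =====
-- import itertools
--
-- def get_skew_prefix(genome):
--     contributions = [0]
--     for nucleotide in genome:
--         if nucleotide == 'C':
--             contributions.append(-1)
--         elif nucleotide == 'G':
--             contributions.append(1)
--         else:
--             contributions.append(0)
--     return list(itertools.accumulate(contributions))
-- ===== SOURCE B (Python) =====
-- def get_skew_prefix(genome):
--     # divide and conquer: the skew prefix list of a concatenation is the left
--     # half's skew list followed by the right half's skew list (without its
--     # leading 0), each entry shifted by the left half's final skew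
--     if len(genome) <= 1:
--         if not genome:
--             return [0]
--         c = genome[0]
--         return [0, 1 if c == 'G' else (-1 if c == 'C' else 0)]
--     mid = len(genome) // 2
--     left = get_skew_prefix(genome[:mid])
--     right = get_skew_prefix(genome[mid:])
--     off = left[-1]
--     return left + [off + x for x in right[1:]]
-- ===== Notes on version B (the rewrite author's own statement) =====
-- stated objective: alternative
-- what changed: Replaces the contributions-list + itertools.accumulate linear pipeline by a divide-and-conquer recursion: split the genome in half, compute each half's skew prefix list recursively, and join them by shifting the right half's list (minus its leading 0) by the left half's final skew.
import Mathlib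
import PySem

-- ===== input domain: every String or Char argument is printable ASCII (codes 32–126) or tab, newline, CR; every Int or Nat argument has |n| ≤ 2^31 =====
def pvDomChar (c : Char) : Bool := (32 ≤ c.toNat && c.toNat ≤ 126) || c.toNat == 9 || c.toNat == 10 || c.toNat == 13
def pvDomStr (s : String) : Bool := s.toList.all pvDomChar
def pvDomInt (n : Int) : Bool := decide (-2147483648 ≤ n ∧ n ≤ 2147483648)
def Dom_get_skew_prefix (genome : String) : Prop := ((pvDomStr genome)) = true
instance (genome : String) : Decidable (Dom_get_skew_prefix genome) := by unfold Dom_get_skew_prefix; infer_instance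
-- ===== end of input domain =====

-- B replaces A's delta-list + itertools.accumulate pipeline by divide and conquer:
-- recurse on the two halves and join by shifting the right half's skew list by the
-- left half's final skew; objective: alternative.

-- ===== PORT A =====
-- itertools.accumulate (no initial): first output is first element, then running sums
def pvAccumGo (s : Int) : List Int → List Int
  | [] => []
  | x :: xs => (s + x) :: pvAccumGo (s + x) xs

def pvAccumulate : List Int → List Int
  | [] => []
  | x :: xs => x :: pvAccumGo x xs

def get_skew_prefix (genome : String) : List Int :=
  let contributions :=
    genome.toList.foldl
      (fun acc nucleotide =>
        acc ++ [if nucleotide = 'C' then (-1 : Int) else if nucleotide = 'G' then 1 else 0])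
      [0]
  pvAccumulate contributions

-- ===== PORT B =====
-- slices genome[:mid] / genome[mid:] with 0 ≤ mid ≤ len are exactly take/drop on the
-- character list; left[-1] on the nonempty recursive result is getLastD (default unreachable)
def pvSkewDC : List Char → List Int
  | [] => [0]
  | [c] => [0, if c = 'G' then (1 : Int) else if c = 'C' then -1 else 0]
  | a :: b :: rest =>
    let l := a :: b :: rest
    let mid := l.length / 2
    let left := pvSkewDC (l.take mid)
    let right := pvSkewDC (l.drop mid)
    let off := left.getLastD 0
    left ++ (right.drop 1).map (fun x => off + x)
termination_by l => l.length
decreasing_by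
  · simp; omega
  · simp; omega

def get_skew_prefix_alt (genome : String) : List Int :=
  pvSkewDC genome.toList

-- ===== PRECONDITION & SPEC =====
def Spec_get_skew_prefix (genome : String) (out : List Int) : Prop := out = get_skew_prefix_alt genome
instance (genome : String) (out : List Int) : Decidable (Spec_get_skew_prefix genome out) := by unfold Spec_get_skew_prefix; infer_instance

-- ===== CLAIM (what is proved, stated in full; the proofs are below) =====
def Claim_equal_get_skew_prefix : Prop := ∀ (genome : String), Dom_get_skew_prefix genome → Spec_get_skew_prefix genome (get_skew_prefix genome)

-- ===== LEMMAS AND PROOFS =====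

-- A's foldl builds the initial list followed by the mapped contributions
theorem pvFoldl_contrib (l : List Char) (init : List Int) :
    l.foldl
      (fun acc nucleotide =>
        acc ++ [if nucleotide = 'C' then (-1 : Int) else if nucleotide = 'G' then 1 else 0])
      init
    = init ++ l.map (fun c => if c = 'C' then (-1 : Int) else if c = 'G' then 1 else 0) := by
  induction l generalizing init with
  | nil => simp
  | cons c cs ih => simp [List.foldl, ih, List.append_assoc]

-- prefix count difference: the mathematical value of the skew at each index
def pvG (t : List Char) : Int := (t.count 'G' : Int) - (t.count 'C' : Int)

-- the list of all prefix skews, the common characterisation of both ports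
def pvPrefixMap (l : List Char) : List Int :=
  (List.range (l.length + 1)).map (fun i => pvG (l.take i))

theorem pvG_cons (c : Char) (t : List Char) :
    pvG (c :: t) = (if c = 'C' then (-1 : Int) else if c = 'G' then 1 else 0) + pvG t := by
  by_cases hC : c = 'C' <;> by_cases hG : c = 'G' <;>
    simp_all [pvG] <;> ring

theorem pvG_append (s t : List Char) : pvG (s ++ t) = pvG s + pvG t := by
  simp [pvG, List.count_append]; ring

-- A SIDE: the running sums of the contributions are the prefix skews
theorem pvAccumGo_eq_counts (l : List Char) (s : Int) :
    pvAccumGo s (l.map (fun c => if c = 'C' then (-1 : Int) else if c = 'G' then 1 else 0))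
    = (List.range l.length).map (fun i => s + pvG (l.take (i + 1))) := by
  induction l generalizing s with
  | nil => rfl
  | cons c cs ih =>
    simp only [List.map, pvAccumGo, ih, List.length_cons, List.range_succ_eq_map,
      List.map_map, List.map_cons]
    congr 1
    · have h1 : pvG [c] = (if c = 'C' then (-1 : Int) else if c = 'G' then 1 else 0) := by
        by_cases hC : c = 'C' <;> by_cases hG : c = 'G' <;> simp_all [pvG]
      simp [List.take_succ_cons, h1]
    · apply List.map_congr_left
      intro i _
      simp only [Function.comp, List.take_succ_cons, pvG_cons]
      ring

theorem pvA_eq_prefixMap (genome : String) :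
    get_skew_prefix genome = pvPrefixMap genome.toList := by
  simp only [get_skew_prefix, pvFoldl_contrib, List.singleton_append, pvAccumulate,
    pvPrefixMap, List.range_succ_eq_map, List.map_cons, List.map_map]
  rw [pvAccumGo_eq_counts]
  refine List.cons_eq_cons.mpr ⟨by simp [pvG], ?_⟩
  apply List.map_congr_left
  intro i _
  simp [Function.comp, pvG]

-- last element of a prefix-skew list is the whole list's skew
theorem pvPrefixMap_getLastD (t : List Char) : (pvPrefixMap t).getLastD 0 = pvG t := by
  simp [pvPrefixMap, List.range_succ]

-- dropping the leading 0 of a prefix-skew list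
theorem pvPrefixMap_drop_one (t : List Char) :
    (pvPrefixMap t).drop 1 = (List.range t.length).map (fun j => pvG (t.take (j + 1))) := by
  simp [pvPrefixMap, List.range_succ_eq_map, List.map_map, Function.comp]

-- the divide-and-conquer join law for prefix-skew lists
theorem pvPrefixMap_split (l : List Char) (mid : Nat) (h : mid ≤ l.length) :
    pvPrefixMap l
    = pvPrefixMap (l.take mid)
      ++ ((pvPrefixMap (l.drop mid)).drop 1).map (fun x => pvG (l.take mid) + x) := by
  rw [pvPrefixMap_drop_one, List.map_map]
  unfold pvPrefixMap
  rw [show l.length + 1 = (mid + 1) + (l.length - mid) from by omega, List.range_add,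
    List.map_append, List.length_take, Nat.min_eq_left h, List.length_drop]
  congr 1
  · apply List.map_congr_left
    intro i hi
    simp only [List.mem_range] at hi
    rw [List.take_take, Nat.min_eq_left (by omega)]
  · rw [List.map_map]
    apply List.map_congr_left
    intro j _
    simp only [Function.comp]
    rw [show mid + 1 + j = mid + (j + 1) from by omega, List.take_add, pvG_append]

-- B SIDE: divide and conquer computes the prefix skews
theorem pvB_eq_prefixMap (l : List Char) : pvSkewDC l = pvPrefixMap l := by
  induction l using pvSkewDC.induct with
  | case1 => simp [pvSkewDC, pvPrefixMap, pvG]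
  | case2 c =>
    have h1 : pvG [c] = (if c = 'G' then (1 : Int) else if c = 'C' then -1 else 0) := by
      by_cases hC : c = 'C' <;> by_cases hG : c = 'G' <;> simp_all [pvG]
    have h0 : pvG ([] : List Char) = 0 := by simp [pvG]
    rw [pvSkewDC]
    simp [pvPrefixMap, List.range_succ, h1, h0]
  | case3 a b rest l mid ih1 ih2 =>
    rw [pvSkewDC]
    -- the let-bound l and mid are definitionally the literal list and its half length
    have e1 : pvSkewDC (List.take ((a :: b :: rest).length / 2) (a :: b :: rest))
        = pvPrefixMap (List.take ((a :: b :: rest).length / 2) (a :: b :: rest)) := ih1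
    have e2 : pvSkewDC (List.drop ((a :: b :: rest).length / 2) (a :: b :: rest))
        = pvPrefixMap (List.drop ((a :: b :: rest).length / 2) (a :: b :: rest)) := ih2
    rw [e1, e2, pvPrefixMap_getLastD]
    exact (pvPrefixMap_split (a :: b :: rest) ((a :: b :: rest).length / 2) (by omega)).symm

-- ===== VERDICT (by name: the statement is the Claim_ definition above) =====
theorem get_skew_prefix_spec : Claim_equal_get_skew_prefix := by
  intro genome _
  show get_skew_prefix genome = get_skew_prefix_alt genome
  rw [pvA_eq_prefixMap, get_skew_prefix_alt, pvB_eq_prefixMap]
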